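-- pv_equiv track=rewrite | github.com/igrechuhin/Synapse | scripts/swift/check_function_lengths.py | count_logical_lines_in_body
-- ===== SOURCE A (Python) =====
-- def count_logical_lines_in_body(lines: list[str], body_start: int) -> int:
--     """Count logical lines inside a brace-delimited body.
--
--     Args:
--         lines: All lines of the file (0-indexed).
--         body_start: Index of the line containing the opening brace.
--
--     Returns:
--         Number of non-blank, non-comment lines inside the body.
--     """
--     depth = 0
--     logical = 0
--     found_open = False
--     i = body_start
--
--     while i < len(lines):
--         for ch in lines[i]:
--             if ch == "{":
--                 depth += 1
--                 found_open = True
--             elif ch == "}":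
--                 depth -= 1
--
--         if found_open and depth == 0:
--             break
--
--         if found_open and depth > 0:
--             stripped = lines[i].strip()
--             if stripped and not stripped.startswith("//"):
--                 logical += 1
--         i += 1
--
--     return logical
-- ===== SOURCE B (Python) =====
-- def count_logical_lines_in_body(lines: list[str], body_start: int) -> int:
--     """Single-pass character-stream automaton: join the body with a NUL
--     sentinel (never present in source text) and classify each line
--     incrementally while tracking brace depth, with no strip/startswith."""
--     body = lines[body_start:]
--     if not body:
--         return 0
--     stream = "\x00".join(body) + "\x00"
--     depth = 0
--     found = False
--     logical = 0
--     pref = ""  # first <=2 chars of the current line after leading whitespace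
--     for ch in stream:
--         if ch == "\x00":  # end of line
--             if found and depth == 0:
--                 return logical
--             if found and depth > 0 and pref and pref != "//":
--                 logical += 1
--             pref = ""
--         else:
--             if ch == "{":
--                 depth += 1
--                 found = True
--             elif ch == "}":
--                 depth -= 1
--             if len(pref) < 2 and not (pref == "" and ch.isspace()):
--                 pref += ch
--     return logical
-- ===== Notes on version B (the rewrite author's own statement) =====
-- stated objective: alternative
-- what changed: B replaces A's indexed while-loop with a nested per-character loop plus strip/startswith library calls by a single flat automaton over the body joined into one character stream with a NUL sentinel, classifying each line incrementally from its first two non-leading-whitespace characters instead of calling strip/startswith.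
-- outside the precondition, e.g. on count_logical_lines_in_body(['{', 'a'], -2): A returns 4, B returns 2
import Mathlib
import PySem

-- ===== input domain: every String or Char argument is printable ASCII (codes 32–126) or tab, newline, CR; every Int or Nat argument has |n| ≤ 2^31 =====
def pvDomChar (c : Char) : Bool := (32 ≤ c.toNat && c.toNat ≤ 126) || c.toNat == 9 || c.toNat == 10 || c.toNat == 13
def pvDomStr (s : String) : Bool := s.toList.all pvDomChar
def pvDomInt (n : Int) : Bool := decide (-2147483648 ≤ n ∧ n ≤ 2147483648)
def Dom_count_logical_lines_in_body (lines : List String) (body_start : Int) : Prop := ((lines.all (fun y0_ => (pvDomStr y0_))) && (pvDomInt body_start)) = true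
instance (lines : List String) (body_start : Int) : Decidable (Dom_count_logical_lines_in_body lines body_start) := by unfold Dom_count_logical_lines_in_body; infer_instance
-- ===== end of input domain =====

-- B restructures A's indexed while-loop (inner char loop + strip/startswith) into one flat automaton over a NUL-joined character stream with incremental line classification (alternative decomposition, same cost).


-- ===== PORT A =====
-- A's while-loop over the index i; per-character fold updates (depth, found_open).
def pvA_loop (lines : List String) (i : Int) (depth : Int) (found : Bool) (logical : Int) : Int :=
  if _h : i < (lines.length : Int) then
    match PySem.List.pyGet? lines i with
    | none => logical  -- Python raises IndexError here (i < -len(lines)); excluded by Pre_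
    | some line =>
      let st := line.toList.foldl
        (fun (p : Int × Bool) ch =>
          if ch = '{' then (p.1 + 1, true)
          else if ch = '}' then (p.1 - 1, p.2) else p) (depth, found)
      if st.2 && st.1 == 0 then logical
      else
        let logical' :=
          if st.2 && decide (0 < st.1) then
            let stripped := PySem.Str.strip line
            if stripped.toList ≠ [] ∧ PySem.Str.startswith stripped "//" = false
            then logical + 1 else logical
          else logical
        pvA_loop lines (i + 1) st.1 st.2 logical'
  else logical
termination_by ((lines.length : Int) - i).toNat
decreasing_by omega

def count_logical_lines_in_body (lines : List String) (body_start : Int) : Int :=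
  pvA_loop lines body_start 0 false 0

-- ===== PORT B =====
-- B's automaton over the NUL-joined character stream: state (depth, found, logical,
-- pref = first ≤2 chars of the current line after leading whitespace).
def pvB_machine : List Char → Int → Bool → Int → List Char → Int
  | [], _, _, logical, _ => logical
  | ch :: rest, depth, found, logical, pref =>
    if ch = '\x00' then  -- end of line
      if found && depth == 0 then logical
      else
        let logical' :=
          if found && decide (0 < depth) && decide (pref ≠ []) && decide (pref ≠ ['/', '/'])
          then logical + 1 else logical
        pvB_machine rest depth found logical' []
    else
      let st :=
        if ch = '{' then (depth + 1, true)
        else if ch = '}' then (depth - 1, found) else (depth, found)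
      let pref' :=
        if pref.length < 2 && !(decide (pref = []) && PySem.Chars.isspace ch)
        then pref ++ [ch] else pref
      pvB_machine rest st.1 st.2 logical pref'

def count_logical_lines_in_body_alt (lines : List String) (body_start : Int) : Int :=
  let body := PySem.List.slice lines (some body_start) none
  if body = [] then 0
  else
    let stream := PySem.Chars.join ['\x00'] (body.map String.toList) ++ ['\x00']
    pvB_machine stream 0 false 0 []

-- ===== PRECONDITION & SPEC =====
-- Pre_ excludes negative body_start, on which A's negative-index wraparound rescans lines
-- from the end (often counting lines twice) and raises IndexError below -len(lines);
-- a line index is naturally non-negative.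
def Pre_count_logical_lines_in_body (lines : List String) (body_start : Int) : Prop :=
  0 ≤ body_start
instance (lines : List String) (body_start : Int) : Decidable (Pre_count_logical_lines_in_body lines body_start) := by unfold Pre_count_logical_lines_in_body; infer_instance

def pvWitness_count_logical_lines_in_body : List String × Int := (["{", "x", "}"], 0)

def Spec_count_logical_lines_in_body (lines : List String) (body_start : Int) (out : Int) : Prop := out = count_logical_lines_in_body_alt lines body_start
instance (lines : List String) (body_start : Int) (out : Int) : Decidable (Spec_count_logical_lines_in_body lines body_start out) := by unfold Spec_count_logical_lines_in_body; infer_instance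

-- ===== CLAIM (what is proved, stated in full; the proofs are below) =====
def Claim_equal_count_logical_lines_in_body : Prop := ∀ (lines : List String) (body_start : Int), Dom_count_logical_lines_in_body lines body_start → Pre_count_logical_lines_in_body lines body_start → Spec_count_logical_lines_in_body lines body_start (count_logical_lines_in_body lines body_start)

-- ===== LEMMAS AND PROOFS =====

-- A's while-loop re-expressed as structural recursion on the remaining lines.
def pvAList : List String → Int → Bool → Int → Int
  | [], _, _, logical => logical
  | line :: rest, depth, found, logical =>
      let st := line.toList.foldl
        (fun (p : Int × Bool) ch =>
          if ch = '{' then (p.1 + 1, true)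
          else if ch = '}' then (p.1 - 1, p.2) else p) (depth, found)
      if st.2 && st.1 == 0 then logical
      else
        let logical' :=
          if st.2 && decide (0 < st.1) then
            let stripped := PySem.Str.strip line
            if stripped.toList ≠ [] ∧ PySem.Str.startswith stripped "//" = false
            then logical + 1 else logical
          else logical
        pvAList rest st.1 st.2 logical'

theorem pv_loop_eq_list (lines : List String) (n : Nat) (d : Int) (f : Bool) (l : Int) :
    pvA_loop lines (n : Int) d f l = pvAList (lines.drop n) d f l := by
  by_cases h : n < lines.length
  · have hget : PySem.List.pyGet? lines (n : Int) = some lines[n] := by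
      exact PySem.List.pyGet?_eq_some_getElem (xs := lines) (i := (n : Int))
        (by exact_mod_cast Int.natCast_nonneg n) (by exact_mod_cast h)
    rw [pvA_loop]
    have hlt : (n : Int) < (lines.length : Int) := by exact_mod_cast h
    rw [dif_pos hlt, hget, List.drop_eq_getElem_cons h, pvAList]
    simp only
    split
    · rfl
    · have : ((n : Int) + 1) = ((n + 1 : Nat) : Int) := by push_cast; ring
      rw [this, pv_loop_eq_list lines (n + 1)]
  · have hge : ¬ ((n : Int) < (lines.length : Int)) := by exact_mod_cast h
    rw [pvA_loop, dif_neg hge, List.drop_eq_nil_of_le (by omega), pvAList]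
termination_by lines.length - n
decreasing_by omega

-- B's pref-update as a fold over a line's characters.
def pvPrefFold (p : List Char) (cs : List Char) : List Char :=
  cs.foldl (fun p ch =>
    if p.length < 2 && !(decide (p = []) && PySem.Chars.isspace ch)
    then p ++ [ch] else p) p

-- Character phase: on NUL-free characters the machine just folds its state.
theorem pvB_machine_chars (cs : List Char) : ∀ (rest : List Char) (d : Int) (f : Bool)
    (l : Int) (p : List Char), '\x00' ∉ cs →
    pvB_machine (cs ++ rest) d f l p =
      pvB_machine rest
        (cs.foldl (fun (p : Int × Bool) ch =>
          if ch = '{' then (p.1 + 1, true)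
          else if ch = '}' then (p.1 - 1, p.2) else p) (d, f)).1
        (cs.foldl (fun (p : Int × Bool) ch =>
          if ch = '{' then (p.1 + 1, true)
          else if ch = '}' then (p.1 - 1, p.2) else p) (d, f)).2
        l (pvPrefFold p cs) := by
  induction cs with
  | nil => intro rest d f l p _; simp [pvPrefFold]
  | cons c t ih =>
    intro rest d f l p hnul
    have hc : c ≠ '\x00' := fun h => hnul (h ▸ List.mem_cons_self)
    have ht : '\x00' ∉ t := fun h => hnul (List.mem_cons_of_mem _ h)
    rw [List.cons_append, pvB_machine, if_neg hc]
    simp only [pvPrefFold, List.foldl_cons]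
    exact ih rest _ _ l _ ht

-- pref states of length ≥ 2 are final.
theorem pvPrefFold_full (cs : List Char) : ∀ (p : List Char), 2 ≤ p.length →
    pvPrefFold p cs = p := by
  induction cs with
  | nil => intro p _; rfl
  | cons c t ih =>
    intro p hp
    simp only [pvPrefFold, List.foldl_cons]
    rw [if_neg (by simp; omega)]
    exact ih p hp

-- Starting empty, the pref fold collects the first two chars after leading whitespace.
theorem pvPrefFold_nil (cs : List Char) :
    pvPrefFold [] cs = (cs.dropWhile PySem.Chars.isspace).take 2 := by
  induction cs with
  | nil => rfl
  | cons c t ih =>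
    by_cases hs : PySem.Chars.isspace c
    · simp only [pvPrefFold, List.foldl_cons, List.dropWhile_cons, hs]
      simpa [pvPrefFold] using ih
    · simp only [pvPrefFold, List.foldl_cons, List.dropWhile_cons, hs]
      rw [if_pos (by simp [hs])]
      simp only [List.nil_append]
      cases t with
      | nil => rfl
      | cons d u =>
        show pvPrefFold [c] (d :: u) = _
        simp only [pvPrefFold, List.foldl_cons]
        rw [if_pos (by simp)]
        have : pvPrefFold [c, d] u = [c, d] := pvPrefFold_full u [c, d] (by simp)
        simpa [pvPrefFold] using this

-- rstrip keeps a non-space head.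
theorem pv_rstrip_cons (c : Char) (u : List Char) (hc : PySem.Chars.isspace c = false) :
    PySem.Chars.rstrip (c :: u) = c :: PySem.Chars.rstrip u := by
  unfold PySem.Chars.rstrip
  rw [List.reverse_cons, List.dropWhile_append]
  by_cases h : (List.dropWhile PySem.Chars.isspace u.reverse).isEmpty
  · rw [if_pos h, List.isEmpty_iff.mp h]
    simp [List.dropWhile, hc]
  · rw [if_neg h]
    simp

-- rstrip is a prefix of its argument.
theorem pv_rstrip_prefix (u : List Char) : PySem.Chars.rstrip u <+: u := by
  unfold PySem.Chars.rstrip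
  have h := List.dropWhile_suffix (l := u.reverse) (p := PySem.Chars.isspace)
  have := h.reverse
  simpa using this

-- The head of dropWhile is not a space.
theorem pv_dropWhile_head (cs : List Char) : ∀ (c : Char) (u : List Char),
    cs.dropWhile PySem.Chars.isspace = c :: u → PySem.Chars.isspace c = false := by
  induction cs with
  | nil => intro c u h; simp at h
  | cons a t ih =>
    intro c u h
    rw [List.dropWhile_cons] at h
    by_cases ha : PySem.Chars.isspace a
    · rw [if_pos ha] at h; exact ih c u h
    · rw [if_neg ha] at h
      cases h
      simpa using ha

-- A's strip/startswith test equals B's first-two-characters test.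
theorem pv_classify (cs : List Char) :
    (PySem.Chars.strip cs ≠ [] ∧ PySem.Chars.startswith (PySem.Chars.strip cs) ['/', '/'] = false)
    ↔ ((cs.dropWhile PySem.Chars.isspace).take 2 ≠ [] ∧
       (cs.dropWhile PySem.Chars.isspace).take 2 ≠ ['/', '/']) := by
  unfold PySem.Chars.strip PySem.Chars.lstrip
  rcases ht : cs.dropWhile PySem.Chars.isspace with _ | ⟨c, u⟩
  · simp [PySem.Chars.rstrip]
  · have hc : PySem.Chars.isspace c = false := pv_dropWhile_head cs c u ht
    rw [pv_rstrip_cons c u hc]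
    have hstart : PySem.Chars.startswith (c :: PySem.Chars.rstrip u) ['/', '/'] = true
        ↔ (c = '/' ∧ u.take 1 = ['/']) := by
      rw [PySem.Chars.startswith_iff]
      constructor
      · rintro ⟨w, hw⟩
        simp only [List.cons_append, List.cons.injEq] at hw
        obtain ⟨h1, h2⟩ := hw
        refine ⟨h1.symm, ?_⟩
        have hpre : PySem.Chars.rstrip u <+: u := pv_rstrip_prefix u
        rw [← h2] at hpre
        obtain ⟨w2, hw2⟩ := hpre
        rw [← hw2]
        simp
      · rintro ⟨h1, h2⟩
        rcases hu : u with _ | ⟨d, v⟩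
        · rw [hu] at h2; simp at h2
        · rw [hu] at h2
          simp only [List.take_succ_cons, List.take_zero, List.cons.injEq] at h2
          have hd : d = '/' := h2.1
          have hdns : PySem.Chars.isspace d = false := by rw [hd]; decide
          rw [pv_rstrip_cons d v hdns, h1, hd]
          exact ⟨PySem.Chars.rstrip v, rfl⟩
    constructor
    · rintro ⟨-, h2⟩
      refine ⟨by simp, ?_⟩
      intro hcon
      rcases hu : u with _ | ⟨d, v⟩
      · rw [hu] at hcon; simp at hcon
      · rw [hu] at hcon
        simp only [List.take_succ_cons, List.take_zero, List.cons.injEq] at hcon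
        have : PySem.Chars.startswith (c :: PySem.Chars.rstrip u) ['/', '/'] = true := by
          rw [hstart]
          exact ⟨hcon.1, by rw [hu]; simp [hcon.2.1]⟩
        rw [this] at h2; exact absurd h2 (by simp)
    · rintro ⟨-, h2⟩
      refine ⟨by simp, ?_⟩
      rcases hsw : PySem.Chars.startswith (c :: PySem.Chars.rstrip u) ['/', '/'] with _ | _
      · rfl
      · exfalso
        obtain ⟨h1, h3⟩ := hstart.mp hsw
        apply h2
        rcases hu : u with _ | ⟨d, v⟩
        · rw [hu] at h3; simp at h3
        · rw [hu] at h3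
          simp only [List.take_succ_cons, List.take_zero, List.cons.injEq] at h3
          simp [h1, h3.1]

-- The line-level loop equals B's automaton on the NUL-terminated stream.
theorem pv_list_eq_machine (body : List String) : ∀ (d : Int) (f : Bool) (l : Int),
    (∀ s ∈ body, '\x00' ∉ s.toList) →
    pvAList body d f l =
      pvB_machine (body.flatMap (fun s => s.toList ++ ['\x00'])) d f l [] := by
  induction body with
  | nil => intro d f l _; rfl
  | cons line rest ih =>
    intro d f l hnul
    have hline : '\x00' ∉ line.toList := hnul line List.mem_cons_self
    have hrest : ∀ s ∈ rest, '\x00' ∉ s.toList := fun s hs => hnul s (List.mem_cons_of_mem _ hs)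
    rw [List.flatMap_cons, List.append_assoc, List.singleton_append,
        pvB_machine_chars line.toList ('\x00' :: rest.flatMap (fun s => s.toList ++ ['\x00'])) d f l [] hline,
        pvB_machine, if_pos rfl, pvAList]
    simp only
    set st := line.toList.foldl
      (fun (p : Int × Bool) ch =>
        if ch = '{' then (p.1 + 1, true)
        else if ch = '}' then (p.1 - 1, p.2) else p) (d, f) with hst
    split
    · rfl
    · rw [ih st.1 st.2 _ hrest]
      congr 1
      -- the two count conditions agree
      rw [pvPrefFold_nil]
      set T := (line.toList.dropWhile PySem.Chars.isspace).take 2 with hT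
      have hcl := pv_classify line.toList
      have hstr : (PySem.Str.strip line).toList = PySem.Chars.strip line.toList := by
        simp [PySem.Str.strip]
      have hsw : PySem.Str.startswith (PySem.Str.strip line) "//"
          = PySem.Chars.startswith (PySem.Chars.strip line.toList) ['/', '/'] := by
        simp [PySem.Str.startswith, PySem.Str.strip]
      by_cases hsf : st.2 = true ∧ 0 < st.1
      · obtain ⟨hf, hdp⟩ := hsf
        have hc1 : (st.2 && decide (0 < st.1)) = true := by simp [hf, hdp]
        rw [if_pos hc1]
        by_cases hB : T ≠ [] ∧ T ≠ ['/', '/']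
        · have hA : PySem.Chars.strip line.toList ≠ [] ∧
              PySem.Chars.startswith (PySem.Chars.strip line.toList) ['/', '/'] = false :=
            hcl.mpr hB
          rw [if_pos (by rw [hstr, hsw]; exact hA),
              if_pos (by simp [hc1, hB.1, hB.2])]
        · have hA : ¬ (PySem.Chars.strip line.toList ≠ [] ∧
              PySem.Chars.startswith (PySem.Chars.strip line.toList) ['/', '/'] = false) :=
            fun h => hB (hcl.mp h)
          rw [if_neg (by rw [hstr, hsw]; exact hA),
              if_neg (by
                intro hcon
                apply hB
                simp only [Bool.and_eq_true, decide_eq_true_eq] at hcon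
                exact ⟨hcon.1.2, hcon.2⟩)]
      · have hc1 : (st.2 && decide (0 < st.1)) = false := by
          rcases hv : st.2 with _ | _
          · simp
          · simp only [Bool.true_and, decide_eq_false_iff_not]
            intro hlt
            exact hsf ⟨hv, hlt⟩
        rw [if_neg (by simp [hc1]), if_neg (by simp [hc1])]

-- The NUL-joined stream is the flatMap of NUL-terminated lines (body nonempty).
theorem pv_join_eq_flatMap (body : List String) (h : body ≠ []) :
    PySem.Chars.join ['\x00'] (body.map String.toList) ++ ['\x00']
      = body.flatMap (fun s => s.toList ++ ['\x00']) := by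
  induction body with
  | nil => exact absurd rfl h
  | cons line rest ih =>
    cases rest with
    | nil => simp [PySem.Chars.join_singleton]
    | cons b u =>
      have hr : (b :: u) ≠ ([] : List String) := by simp
      rw [List.map_cons, List.flatMap_cons, ← ih hr, List.map_cons,
          PySem.Chars.join_cons_cons, ← List.map_cons]
      simp

-- ===== VERDICT (by name: the statement is the Claim_ definition above) =====
theorem count_logical_lines_in_body_spec : Claim_equal_count_logical_lines_in_body := by
  intro lines body_start hdom hpre
  unfold Spec_count_logical_lines_in_body
  unfold count_logical_lines_in_body count_logical_lines_in_body_alt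
  have hbs : body_start = ((body_start.toNat : Nat) : Int) :=
    (Int.toNat_of_nonneg hpre).symm
  rw [hbs, PySem.List.slice_from_natCast, pv_loop_eq_list]
  simp only
  set body := lines.drop body_start.toNat with hbody
  by_cases hb : body = []
  · rw [if_pos hb, hb]; rfl
  · rw [if_neg hb]
    have hnul : ∀ s ∈ body, '\x00' ∉ s.toList := by
      intro s hs
      have hmem : s ∈ lines := List.mem_of_mem_drop hs
      unfold Dom_count_logical_lines_in_body at hdom
      simp only [Bool.and_eq_true, List.all_eq_true] at hdom
      have hstr := hdom.1 s hmem
      unfold pvDomStr at hstr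
      rw [List.all_eq_true] at hstr
      intro hin
      have := hstr _ hin
      unfold pvDomChar at this
      simp at this
    rw [pv_join_eq_flatMap body hb, pv_list_eq_machine body 0 false 0 hnul]
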